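-- pv_equiv track=rewrite | github.com/geodimitrov/Python-Fundamentals-SoftUni | Lists/Basics/More Exercises/04. battle_ships.py | execute_attacks
-- ===== SOURCE A (Python) =====
-- def is_ship(field, row, col):
--     if field[row][col] > 0:
--         return True
--
-- def attack_cell(field, row, col, destroyed_ships):
--     if field[row][col] > 1:
--         field[row][col] -= 1
--     else:
--         field[row][col] = 0
--         destroyed_ships += 1
--     return destroyed_ships
--
-- def execute_attacks(attacks_info, field):
--     destroyed_ships = 0
--
--     for attack in attacks_info:
--         row = int(attack[0])
--         column = int(attack[2])
--         if is_ship(field, row, column):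
--             destroyed_ships = attack_cell(field, row, column, destroyed_ships)
--
--     return destroyed_ships
-- ===== SOURCE B (Python) =====
-- def execute_attacks(attacks_info, field):
--     # Tabulate attacks per cell, then resolve each attacked cell once.
--     counts = {}
--     for attack in attacks_info:
--         cell = (int(attack[0]), int(attack[2]))
--         counts[cell] = counts.get(cell, 0) + 1
--     destroyed_ships = 0
--     for (row, col), k in counts.items():
--         h = field[row][col]
--         if h > 0:
--             field[row][col] = max(0, h - k)
--             if k >= h:
--                 destroyed_ships += 1
--     return destroyed_ships
-- ===== Notes on version B (the rewrite author's own statement) =====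
-- stated objective: alternative
-- what changed: A decrements the field one attack at a time and counts a ship when a hit lands on health 1; B first tabulates attack counts per cell in one dict pass, then resolves every attacked cell once via max(0,h-k), counting it destroyed when k>=h.
import Mathlib
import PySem

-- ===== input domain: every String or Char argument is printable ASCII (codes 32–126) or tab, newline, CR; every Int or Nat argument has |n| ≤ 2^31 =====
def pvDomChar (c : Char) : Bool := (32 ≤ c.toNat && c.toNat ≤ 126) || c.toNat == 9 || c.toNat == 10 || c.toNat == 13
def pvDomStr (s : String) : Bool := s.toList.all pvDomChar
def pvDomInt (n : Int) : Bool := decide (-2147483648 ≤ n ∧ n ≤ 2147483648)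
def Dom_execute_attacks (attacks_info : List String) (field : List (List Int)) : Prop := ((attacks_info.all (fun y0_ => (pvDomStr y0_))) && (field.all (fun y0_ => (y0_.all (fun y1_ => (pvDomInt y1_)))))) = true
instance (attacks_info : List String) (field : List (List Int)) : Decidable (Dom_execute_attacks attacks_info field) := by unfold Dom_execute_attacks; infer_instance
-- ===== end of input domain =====

-- B replaces A's per-attack decrement loop by one counter pass over the attacks followed by one
-- resolve pass over the distinct attacked cells (objective: alternative decomposition, same cost).
-- Both Pythons mutate `field` in place to the same final state; the theorems are about the return value.

-- shared helpers (both Pythons do the same cell parsing and the same field[row][col] indexing)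
def pvParse (a : String) : Int × Int :=
  (((PySem.Str.pyGet? a 0).bind (fun c => PySem.Int.ofChars? [c])).getD 0,
   ((PySem.Str.pyGet? a 2).bind (fun c => PySem.Int.ofChars? [c])).getD 0)

def pvReadCell (field : List (List Int)) (r c : Int) : Int :=
  (PySem.List.pyGet? ((PySem.List.pyGet? field r).getD []) c).getD 0

def pvWriteCell (field : List (List Int)) (r c : Int) (v : Int) : List (List Int) :=
  PySem.List.pySetD field r (PySem.List.pySetD ((PySem.List.pyGet? field r).getD []) c v)

-- ===== PORT A =====
def is_ship (field : List (List Int)) (row col : Int) : Bool :=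
  decide (0 < pvReadCell field row col)

def attack_cell (field : List (List Int)) (row col : Int) (destroyed_ships : Int) :
    List (List Int) × Int :=
  if 1 < pvReadCell field row col then
    (pvWriteCell field row col (pvReadCell field row col - 1), destroyed_ships)
  else
    (pvWriteCell field row col 0, destroyed_ships + 1)

def execute_attacks (attacks_info : List String) (field : List (List Int)) : Int :=
  (attacks_info.foldl (fun st attack =>
      let rc := pvParse attack
      if is_ship st.1 rc.1 rc.2 then attack_cell st.1 rc.1 rc.2 st.2 else st)
    (field, 0)).2

-- ===== PORT B =====
def execute_attacks_alt (attacks_info : List String) (field : List (List Int)) : Int :=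
  let counts : PySem.Dict (Int × Int) Int :=
    attacks_info.foldl (fun d attack =>
      let cell := pvParse attack
      d.insert cell (d.getD cell 0 + 1)) PySem.Dict.empty
  (counts.items.foldl (fun st it =>
      let h := pvReadCell st.1 it.1.1 it.1.2
      if 0 < h then
        (pvWriteCell st.1 it.1.1 it.1.2 (max 0 (h - it.2)),
         if h ≤ it.2 then st.2 + 1 else st.2)
      else st)
    (field, 0)).2

-- ===== PRECONDITION & SPEC =====
def pvDigits : List Char := ['0', '1', '2', '3', '4', '5', '6', '7', '8', '9']

-- Pre_ = exactly the inputs where Python A returns: every attack string has ≥ 3 characters,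
-- its characters 0 and 2 are decimal digits, and they name an in-range row and column of
-- `field` (otherwise Python raises IndexError or ValueError).
def Pre_execute_attacks (attacks_info : List String) (field : List (List Int)) : Prop :=
  ∀ a ∈ attacks_info,
    3 ≤ a.toList.length ∧
    a.toList.getD 0 ' ' ∈ pvDigits ∧ a.toList.getD 2 ' ' ∈ pvDigits ∧
    (a.toList.getD 0 ' ').toNat - 48 < field.length ∧
    (a.toList.getD 2 ' ').toNat - 48 < (field.getD ((a.toList.getD 0 ' ').toNat - 48) []).length

instance (attacks_info : List String) (field : List (List Int)) :
    Decidable (Pre_execute_attacks attacks_info field) := by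
  unfold Pre_execute_attacks; infer_instance

def pvWitness_execute_attacks : List String × List (List Int) :=
  (["1 2", "0 0"], [[1, 0, 0], [0, 0, 2]])

def Spec_execute_attacks (attacks_info : List String) (field : List (List Int)) (out : Int) : Prop := out = execute_attacks_alt attacks_info field
instance (attacks_info : List String) (field : List (List Int)) (out : Int) : Decidable (Spec_execute_attacks attacks_info field out) := by unfold Spec_execute_attacks; infer_instance

-- ===== CLAIM (what is proved, stated in full; the proofs are below) =====
def Claim_equal_execute_attacks : Prop := ∀ (attacks_info : List String) (field : List (List Int)), Dom_execute_attacks attacks_info field → Pre_execute_attacks attacks_info field → Spec_execute_attacks attacks_info field (execute_attacks attacks_info field)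

-- ===== LEMMAS AND PROOFS =====

-- cell-level proof vocabulary
def pvRdC (f : List (List Int)) (p : Int × Int) : Int := pvReadCell f p.1 p.2
def pvWrC (f : List (List Int)) (p : Int × Int) (v : Int) : List (List Int) := pvWriteCell f p.1 p.2 v
def pvGd (f : List (List Int)) (p : Int × Int) : Prop :=
  0 ≤ p.1 ∧ 0 ≤ p.2 ∧ p.1.toNat < f.length ∧ p.2.toNat < (f[p.1.toNat]?.getD []).length

-- the common predicate both programs count: cell attacked often enough to sink its ship
abbrev pvPredA (cs : List (Int × Int)) (f : List (List Int)) (p : Int × Int) : Prop :=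
  0 < pvRdC f p ∧ pvRdC f p ≤ (cs.count p : Int)

theorem pvRd_eq (f : List (List Int)) (p : Int × Int) (h1 : 0 ≤ p.1) (h2 : 0 ≤ p.2) :
    pvRdC f p = (f[p.1.toNat]?.getD [])[p.2.toNat]?.getD 0 := by
  simp [pvRdC, pvReadCell, PySem.List.pyGet?_of_nonneg _ h1, PySem.List.pyGet?_of_nonneg _ h2]

theorem pvWr_eq (f : List (List Int)) (p : Int × Int) (v : Int) (h1 : 0 ≤ p.1) (h2 : 0 ≤ p.2) :
    pvWrC f p v = f.set p.1.toNat ((f[p.1.toNat]?.getD []).set p.2.toNat v) := by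
  simp [pvWrC, pvWriteCell, PySem.List.pyGet?_of_nonneg _ h1,
    PySem.List.pySetD_of_nonneg _ _ h1, PySem.List.pySetD_of_nonneg _ _ h2]

theorem pvRd_wr_self (f : List (List Int)) (p : Int × Int) (v : Int) (hg : pvGd f p) :
    pvRdC (pvWrC f p v) p = v := by
  obtain ⟨h1, h2, hr, hc⟩ := hg
  rw [pvWr_eq f p v h1 h2, pvRd_eq _ p h1 h2]
  rw [List.getElem?_set_self (by omega)]
  simp only [Option.getD_some]
  rw [List.getElem?_set_self (by omega)]
  rfl

theorem pvRd_wr_ne (f : List (List Int)) (p q : Int × Int) (v : Int)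
    (hp1 : 0 ≤ p.1) (hp2 : 0 ≤ p.2) (hq1 : 0 ≤ q.1) (hq2 : 0 ≤ q.2) (hne : q ≠ p) :
    pvRdC (pvWrC f p v) q = pvRdC f q := by
  rw [pvWr_eq f p v hp1 hp2, pvRd_eq _ q hq1 hq2, pvRd_eq f q hq1 hq2]
  rw [List.getElem?_set]
  by_cases hrow : p.1.toNat = q.1.toNat
  · have hpq1 : q.1 = p.1 := by omega
    have hcol : p.2.toNat ≠ q.2.toNat := by
      intro h; exact hne (Prod.ext hpq1 (by omega))
    rw [if_pos hrow]
    by_cases hlen : p.1.toNat < f.length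
    · rw [if_pos hlen]
      simp only [Option.getD_some]
      rw [List.getElem?_set_ne hcol, hrow]
    · rw [if_neg hlen]
      have : f[q.1.toNat]? = none := by
        rw [List.getElem?_eq_none] <;> omega
      rw [this]
  · rw [if_neg hrow]

theorem pvGd_wr (f : List (List Int)) (p q : Int × Int) (v : Int)
    (hp1 : 0 ≤ p.1) (hp2 : 0 ≤ p.2) (hq : pvGd f q) : pvGd (pvWrC f p v) q := by
  obtain ⟨h1, h2, hr, hc⟩ := hq
  rw [pvWr_eq f p v hp1 hp2]
  refine ⟨h1, h2, by simpa using hr, ?_⟩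
  rw [List.getElem?_set]
  by_cases hrow : p.1.toNat = q.1.toNat
  · rw [if_pos hrow, if_pos (by omega)]
    simpa [hrow] using hc
  · rw [if_neg hrow]; exact hc

-- A's loop body on a parsed cell
def pvStepA (st : List (List Int) × Int) (p : Int × Int) : List (List Int) × Int :=
  if is_ship st.1 p.1 p.2 then attack_cell st.1 p.1 p.2 st.2 else st

-- B's resolve-loop body on a (cell, attack-count) item
def pvStepB (st : List (List Int) × Int) (it : (Int × Int) × Int) : List (List Int) × Int :=
  if 0 < pvRdC st.1 it.1 then
    (pvWrC st.1 it.1 (max 0 (pvRdC st.1 it.1 - it.2)),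
     if pvRdC st.1 it.1 ≤ it.2 then st.2 + 1 else st.2)
  else st

theorem pvCount_cons_ne (c x : Int × Int) (cs : List (Int × Int)) (h : x ≠ c) :
    (c :: cs).count x = cs.count x := by
  simp [Ne.symm h]

theorem pvFilter_skip (cs : List (Int × Int)) (f : List (List Int)) (c : Int × Int)
    (h0 : ¬ 0 < pvRdC f c) :
    ((c :: cs).toFinset.filter (pvPredA (c :: cs) f)).card
      = (cs.toFinset.filter (pvPredA cs f)).card := by
  rw [List.toFinset_cons, Finset.filter_insert, if_neg (by intro h; exact h0 h.1)]
  refine congrArg Finset.card (Finset.filter_congr fun x _ => ?_)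
  simp only [pvPredA]
  by_cases hx : x = c
  · subst hx; constructor <;> (intro h; exact absurd h.1 h0)
  · rw [pvCount_cons_ne c x cs hx]

theorem pvFilter_shift (cs : List (Int × Int)) (f : List (List Int)) (c : Int × Int)
    (hgc : pvGd f c) (hgd : ∀ p ∈ cs, pvGd f p) (h1 : 1 < pvRdC f c) :
    ((c :: cs).toFinset.filter (pvPredA (c :: cs) f)).card
      = (cs.toFinset.filter (pvPredA cs (pvWrC f c (pvRdC f c - 1)))).card := by
  have hc1 : 0 ≤ c.1 := hgc.1
  have hc2 : 0 ≤ c.2 := hgc.2.1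
  have hrdc : pvRdC (pvWrC f c (pvRdC f c - 1)) c = pvRdC f c - 1 := pvRd_wr_self f c _ hgc
  have hiff : ∀ x ∈ cs.toFinset,
      pvPredA (c :: cs) f x ↔ pvPredA cs (pvWrC f c (pvRdC f c - 1)) x := by
    intro x hxS
    have hxcs : x ∈ cs := List.mem_toFinset.mp hxS
    have hx1 : 0 ≤ x.1 := (hgd x hxcs).1
    have hx2 : 0 ≤ x.2 := (hgd x hxcs).2.1
    simp only [pvPredA]
    by_cases hx : x = c
    · subst hx
      rw [hrdc]
      simp only [List.count_cons_self]
      push_cast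
      constructor <;> (rintro ⟨ha, hb⟩; exact ⟨by omega, by omega⟩)
    · rw [pvRd_wr_ne f c x _ hc1 hc2 hx1 hx2 hx, pvCount_cons_ne c x cs hx]
  rw [List.toFinset_cons, Finset.filter_insert]
  by_cases hPc : pvPredA (c :: cs) f c
  · rw [if_pos hPc]
    have hcmem : c ∈ cs := by
      have hb := hPc.2
      simp only [List.count_cons_self] at hb
      push_cast at hb
      exact List.count_pos_iff.mp (by omega)
    rw [Finset.insert_eq_self.mpr (Finset.mem_filter.mpr ⟨List.mem_toFinset.mpr hcmem, hPc⟩)]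
    exact congrArg Finset.card (Finset.filter_congr hiff)
  · rw [if_neg hPc]
    exact congrArg Finset.card (Finset.filter_congr hiff)

theorem pvFilter_kill (cs : List (Int × Int)) (f : List (List Int)) (c : Int × Int)
    (hgc : pvGd f c) (hgd : ∀ p ∈ cs, pvGd f p) (h0 : pvRdC f c = 1) :
    ((c :: cs).toFinset.filter (pvPredA (c :: cs) f)).card
      = (cs.toFinset.filter (pvPredA cs (pvWrC f c 0))).card + 1 := by
  have hc1 : 0 ≤ c.1 := hgc.1
  have hc2 : 0 ≤ c.2 := hgc.2.1
  have hrdc : pvRdC (pvWrC f c 0) c = 0 := pvRd_wr_self f c 0 hgc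
  have hPc : pvPredA (c :: cs) f c := by
    refine ⟨by omega, ?_⟩
    rw [h0]; simp only [List.count_cons_self]; push_cast; omega
  have hset : cs.toFinset.filter (pvPredA cs (pvWrC f c 0))
      = (cs.toFinset.filter (pvPredA (c :: cs) f)).erase c := by
    ext x
    simp only [Finset.mem_erase, Finset.mem_filter, List.mem_toFinset]
    constructor
    · rintro ⟨hxcs, hP⟩
      have hx : x ≠ c := by
        intro h; subst h
        simp only [pvPredA, hrdc] at hP
        omega
      have hx1 : 0 ≤ x.1 := (hgd x hxcs).1
      have hx2 : 0 ≤ x.2 := (hgd x hxcs).2.1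
      simp only [pvPredA] at hP ⊢
      rw [pvRd_wr_ne f c x 0 hc1 hc2 hx1 hx2 hx] at hP
      rw [pvCount_cons_ne c x cs hx]
      exact ⟨hx, hxcs, hP⟩
    · rintro ⟨hx, hxcs, hP⟩
      have hx1 : 0 ≤ x.1 := (hgd x hxcs).1
      have hx2 : 0 ≤ x.2 := (hgd x hxcs).2.1
      simp only [pvPredA] at hP ⊢
      rw [pvCount_cons_ne c x cs hx] at hP
      rw [pvRd_wr_ne f c x 0 hc1 hc2 hx1 hx2 hx]
      exact ⟨hxcs, hP⟩
  rw [hset, List.toFinset_cons, Finset.filter_insert, if_pos hPc]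
  by_cases hcI : c ∈ cs.toFinset.filter (pvPredA (c :: cs) f)
  · rw [Finset.insert_eq_self.mpr hcI, Finset.card_erase_of_mem hcI]
    have hpos : 0 < (cs.toFinset.filter (pvPredA (c :: cs) f)).card :=
      Finset.card_pos.mpr ⟨c, hcI⟩
    omega
  · rw [Finset.card_insert_of_notMem hcI, Finset.erase_eq_of_notMem hcI]

theorem pvLoopA_eq (cs : List (Int × Int)) : ∀ (f : List (List Int)) (d : Int),
    (∀ p ∈ cs, pvGd f p) →
    (cs.foldl pvStepA (f, d)).2 = d + ((cs.toFinset.filter (pvPredA cs f)).card : Int) := by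
  induction cs with
  | nil => intro f d _; simp
  | cons c cs IH =>
    intro f d hgd
    have hgc : pvGd f c := hgd c List.mem_cons_self
    have hc1 : 0 ≤ c.1 := hgc.1
    have hc2 : 0 ≤ c.2 := hgc.2.1
    have hrd : pvReadCell f c.1 c.2 = pvRdC f c := rfl
    simp only [List.foldl_cons]
    by_cases h0 : 0 < pvRdC f c
    · by_cases h1 : 1 < pvRdC f c
      · have hstep : pvStepA (f, d) c = (pvWrC f c (pvRdC f c - 1), d) := by
          simp [pvStepA, is_ship, attack_cell, hrd, h0, h1, pvWrC]
        rw [hstep, IH _ d (fun p hp => pvGd_wr f c p _ hc1 hc2 (hgd p (List.mem_cons_of_mem c hp)))]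
        rw [pvFilter_shift cs f c hgc (fun p hp => hgd p (List.mem_cons_of_mem c hp)) h1]
      · have hone : pvRdC f c = 1 := by omega
        have hstep : pvStepA (f, d) c = (pvWrC f c 0, d + 1) := by
          simp [pvStepA, is_ship, attack_cell, hrd, h0, h1, pvWrC]
        rw [hstep, IH _ (d + 1) (fun p hp => pvGd_wr f c p _ hc1 hc2 (hgd p (List.mem_cons_of_mem c hp)))]
        rw [pvFilter_kill cs f c hgc (fun p hp => hgd p (List.mem_cons_of_mem c hp)) hone]
        push_cast; ring
    · have hstep : pvStepA (f, d) c = (f, d) := by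
        simp [pvStepA, is_ship, hrd, h0]
      rw [hstep, IH f d (fun p hp => hgd p (List.mem_cons_of_mem c hp))]
      rw [pvFilter_skip cs f c h0]

theorem pvLoopB_eq (l : List ((Int × Int) × Int)) : ∀ (f : List (List Int)) (d : Int),
    (l.map Prod.fst).Nodup → (∀ x ∈ l, pvGd f x.1) →
    (l.foldl pvStepB (f, d)).2
      = d + (l.countP (fun x => decide (0 < pvRdC f x.1 ∧ pvRdC f x.1 ≤ x.2)) : Int) := by
  induction l with
  | nil => intro f d _ _; simp
  | cons a t IH =>
    intro f d hnd hgd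
    simp only [List.map_cons, List.nodup_cons] at hnd
    obtain ⟨hafst, hndt⟩ := hnd
    have hga : pvGd f a.1 := hgd a List.mem_cons_self
    obtain ⟨ha1, ha2, -, -⟩ := hga
    simp only [List.foldl_cons, List.countP_cons]
    by_cases h0 : 0 < pvRdC f a.1
    · have hstep : pvStepB (f, d) a
          = (pvWrC f a.1 (max 0 (pvRdC f a.1 - a.2)), if pvRdC f a.1 ≤ a.2 then d + 1 else d) := by
        simp [pvStepB, h0]
      rw [hstep, IH _ _ hndt
        (fun x hx => pvGd_wr f a.1 x.1 _ ha1 ha2 (hgd x (List.mem_cons_of_mem a hx)))]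
      have hrdt : ∀ x ∈ t,
          pvRdC (pvWrC f a.1 (max 0 (pvRdC f a.1 - a.2))) x.1 = pvRdC f x.1 := by
        intro x hx
        obtain ⟨hx1, hx2, -, -⟩ := hgd x (List.mem_cons_of_mem a hx)
        have hne : x.1 ≠ a.1 := by
          intro h; exact hafst (h ▸ List.mem_map_of_mem hx)
        exact pvRd_wr_ne f a.1 x.1 _ ha1 ha2 hx1 hx2 hne
      have hcongr : t.countP
            (fun x => decide (0 < pvRdC (pvWrC f a.1 (max 0 (pvRdC f a.1 - a.2))) x.1 ∧
              pvRdC (pvWrC f a.1 (max 0 (pvRdC f a.1 - a.2))) x.1 ≤ x.2))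
          = t.countP (fun x => decide (0 < pvRdC f x.1 ∧ pvRdC f x.1 ≤ x.2)) := by
        refine List.countP_congr fun x hx => ?_
        simp [hrdt x hx]
      rw [hcongr]
      by_cases hk : pvRdC f a.1 ≤ a.2 <;> simp [h0, hk] <;> push_cast <;> ring
    · have hstep : pvStepB (f, d) a = (f, d) := by simp [pvStepB, h0]
      rw [hstep, IH f d hndt (fun x hx => hgd x (List.mem_cons_of_mem a hx))]
      simp [h0]

theorem pvDigit_val (c : Char) (hc : c ∈ pvDigits) :
    PySem.Int.ofChars? [c] = some (((c.toNat - 48 : Nat)) : Int) := by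
  simp only [pvDigits, List.mem_cons, List.not_mem_nil, or_false] at hc
  rcases hc with rfl | rfl | rfl | rfl | rfl | rfl | rfl | rfl | rfl | rfl <;> decide

theorem pvParse_spec (a : String) (h3 : 3 ≤ a.toList.length)
    (h0 : a.toList.getD 0 ' ' ∈ pvDigits) (h2 : a.toList.getD 2 ' ' ∈ pvDigits) :
    pvParse a = ((((a.toList.getD 0 ' ').toNat - 48 : Nat) : Int),
                 (((a.toList.getD 2 ' ').toNat - 48 : Nat) : Int)) := by
  rcases hl : a.toList with _ | ⟨c0, l1⟩
  · rw [hl] at h3; simp at h3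
  rcases l1 with _ | ⟨c1, l2⟩
  · rw [hl] at h3; simp at h3
  rcases l2 with _ | ⟨c2, t⟩
  · rw [hl] at h3; simp at h3
  rw [hl] at h0 h2
  simp only [List.getD_cons_zero, List.getD_cons_succ] at h0 h2
  have e0 : PySem.List.pyGet? (c0 :: c1 :: c2 :: t) (0 : Int) = some c0 := by
    rw [show (0 : Int) = ((0 : Nat) : Int) from rfl, PySem.List.pyGet?_natCast]; rfl
  have e2 : PySem.List.pyGet? (c0 :: c1 :: c2 :: t) (2 : Int) = some c2 := by
    rw [show (2 : Int) = ((2 : Nat) : Int) from rfl, PySem.List.pyGet?_natCast]; rfl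
  simp [pvParse, hl, e0, e2, pvDigit_val c0 h0, pvDigit_val c2 h2]

-- ===== VERDICT (by name: the statement is the Claim_ definition above) =====
theorem pvCountP_nodup_eq_card (dl : List (Int × Int)) (hnd : dl.Nodup)
    (P : (Int × Int) → Prop) [DecidablePred P] :
    dl.countP (fun p => decide (P p)) = (dl.toFinset.filter P).card := by
  rw [List.countP_eq_length_filter, ← List.toFinset_card_of_nodup (hnd.filter _),
    List.toFinset_filter]
  refine congrArg Finset.card (Finset.filter_congr fun x _ => ?_)
  simp

theorem execute_attacks_spec : Claim_equal_execute_attacks := by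
  intro attacks field _ hpre
  unfold Spec_execute_attacks
  have hGd : ∀ p ∈ attacks.map pvParse, pvGd field p := by
    intro p hp
    obtain ⟨a, ha, rfl⟩ := List.mem_map.mp hp
    obtain ⟨h3, h0, h2, hr, hc⟩ := hpre a ha
    rw [pvParse_spec a h3 h0 h2]
    rw [List.getD_eq_getElem?_getD] at hc
    exact ⟨Int.natCast_nonneg _, Int.natCast_nonneg _, by simpa using hr, by simpa using hc⟩
  -- A side: per-attack loop counts the cells attacked at least as often as their health
  have hA : execute_attacks attacks field
      = ((attacks.map pvParse).foldl pvStepA (field, 0)).2 := by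
    unfold execute_attacks
    rw [List.foldl_map]
    rfl
  -- B side: the counter loop is PySem.Dict.counter of the parsed cells
  have hcnt : attacks.foldl (fun d attack =>
        let cell := pvParse attack
        d.insert cell (d.getD cell 0 + 1)) PySem.Dict.empty
      = PySem.Dict.counter (attacks.map pvParse) := by
    rw [← PySem.Dict.foldl_insert_getD_add_one_eq_counter, List.foldl_map]
  have hB : execute_attacks_alt attacks field
      = (((PySem.Dict.counter (attacks.map pvParse)).items).foldl pvStepB (field, 0)).2 := by
    unfold execute_attacks_alt
    rw [hcnt]
    rfl
  rw [hA, hB, PySem.Dict.items_counter]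
  set cells := attacks.map pvParse with hcells
  set dl := PySem.Set.ofList cells with hdl
  have hndl : ((dl.map (fun k => (k, (cells.count k : Int)))).map Prod.fst).Nodup := by
    simp [List.map_map, Function.comp_def, hdl]
  have hGd' : ∀ x ∈ dl.map (fun k => (k, (cells.count k : Int))), pvGd field x.1 := by
    intro x hx
    obtain ⟨k, hk, rfl⟩ := List.mem_map.mp hx
    exact hGd k ((PySem.Set.mem_ofList _ _).mp hk)
  rw [pvLoopA_eq cells field 0 hGd, pvLoopB_eq _ field 0 hndl hGd']
  congr 1
  rw [List.countP_map]
  have hstep : dl.countP ((fun x => decide (0 < pvRdC field x.1 ∧ pvRdC field x.1 ≤ x.2)) ∘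
        (fun k => (k, (cells.count k : Int))))
      = dl.countP (fun p => decide (pvPredA cells field p)) := by
    refine List.countP_congr fun x _ => ?_
    simp [pvPredA]
  rw [hstep, pvCountP_nodup_eq_card dl (PySem.Set.nodup_ofList cells) (pvPredA cells field)]
  have hTF : dl.toFinset = cells.toFinset := by
    ext x
    simp [hdl, PySem.Set.mem_ofList]
  rw [hTF]
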